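-- pv_equiv track=rewrite | github.com/vmelnic/soma | soma-synthesizer/soma_synthesizer/data.py | _product_of_pools
-- ===== SOURCE A (Python) =====
-- from itertools import product
--
-- def _product_of_pools(params: dict) -> list[dict]:
--     """Cartesian product of named parameter pools.
--
--     ``params`` maps param-name to ``{"pool": [...], ...}`` (or a plain list).
--     Returns a list of dicts mapping param-name to a concrete value.
--     """
--     if not params:
--         return [{}]
--
--     names = list(params.keys())
--     pools = []
--     for name in names:
--         spec = params[name]
--         pool = spec["pool"] if isinstance(spec, dict) else spec
--         pools.append(pool)
--
--     combos = []
--     for vals in product(*pools):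
--         combos.append(dict(zip(names, vals)))
--     return combos
-- ===== SOURCE B (Python) =====
-- def _product_of_pools(params: dict) -> list[dict]:
--     """Cartesian product of named parameter pools (fold instead of itertools.product)."""
--     result = [{}]
--     for name, spec in params.items():
--         pool = spec["pool"] if isinstance(spec, dict) else spec
--         result = [{**d, name: v} for d in result for v in pool]
--     return result
-- ===== Notes on version B (the rewrite author's own statement) =====
-- stated objective: idiomatic
-- what changed: Replaces itertools.product over pre-collected pools (then zipping each tuple back with the names) by a single fold that extends partial dicts pool by pool, never materializing the name/pool lists or value tuples.
import Mathlib
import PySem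

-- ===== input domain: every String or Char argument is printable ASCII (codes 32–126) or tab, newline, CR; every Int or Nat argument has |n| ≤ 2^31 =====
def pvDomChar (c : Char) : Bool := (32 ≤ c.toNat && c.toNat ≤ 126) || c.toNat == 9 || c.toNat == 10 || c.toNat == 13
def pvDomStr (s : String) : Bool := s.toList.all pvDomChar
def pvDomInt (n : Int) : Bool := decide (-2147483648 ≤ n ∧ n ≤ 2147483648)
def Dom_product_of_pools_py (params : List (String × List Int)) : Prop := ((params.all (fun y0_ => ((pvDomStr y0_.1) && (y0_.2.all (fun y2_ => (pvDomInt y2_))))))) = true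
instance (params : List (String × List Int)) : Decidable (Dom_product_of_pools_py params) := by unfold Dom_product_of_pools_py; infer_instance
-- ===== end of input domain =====

-- ===== PORT A =====
-- B changes A's itertools.product-over-collected-pools into a single fold extending partial
-- dicts; objective: more idiomatic, same cost.
-- itertools.product(*pools): last pool varies fastest
def pvProdAll : List (List Int) → List (List Int)
  | [] => [[]]
  | p :: ps => p.flatMap (fun v => (pvProdAll ps).map (fun vs => v :: vs))

def product_of_pools_py (params : List (String × List Int)) : List (List (String × Int)) :=
  if params = [] then [[]]
  else
    let names := params.map (·.1)
    let pools := params.foldl (fun acc np => acc ++ [np.2]) []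
    (pvProdAll pools).map (fun vals => names.zip vals)

-- ===== PORT B =====
def product_of_pools_py_alt (params : List (String × List Int)) : List (List (String × Int)) :=
  params.foldl (fun result np => result.flatMap (fun d => np.2.map (fun v => d ++ [(np.1, v)]))) [[]]

-- ===== PRECONDITION & SPEC =====
-- Pre_ requires pairwise-distinct parameter names: the list encodes a Python dict, whose keys
-- are always distinct, so no input of A is excluded.
def Pre_product_of_pools_py (params : List (String × List Int)) : Prop :=
  params.Pairwise (fun a b => a.1 ≠ b.1)
instance (params : List (String × List Int)) : Decidable (Pre_product_of_pools_py params) := by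
  unfold Pre_product_of_pools_py; infer_instance
def pvWitness_product_of_pools_py : (List (String × List Int)) := [("a", [1, 2]), ("b", [3])]
def Spec_product_of_pools_py (params : List (String × List Int)) (out : List (List (String × Int))) : Prop := out = product_of_pools_py_alt params
instance (params : List (String × List Int)) (out : List (List (String × Int))) : Decidable (Spec_product_of_pools_py params out) := by unfold Spec_product_of_pools_py; infer_instance

-- ===== CLAIM (what is proved, stated in full; the proofs are below) =====
def Claim_equal_product_of_pools_py : Prop := ∀ (params : List (String × List Int)), Dom_product_of_pools_py params → Pre_product_of_pools_py params → Spec_product_of_pools_py params (product_of_pools_py params)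

-- ===== LEMMAS AND PROOFS =====
lemma pvFoldl_append_snd (params : List (String × List Int)) (acc : List (List Int)) :
    params.foldl (fun acc np => acc ++ [np.2]) acc = acc ++ params.map (·.2) := by
  induction params generalizing acc with
  | nil => simp
  | cons hd tl ih => simp [List.foldl_cons, ih, List.append_assoc]

lemma pvFoldl_extend (params : List (String × List Int)) (acc : List (List (String × Int))) :
    params.foldl (fun result np => result.flatMap (fun d => np.2.map (fun v => d ++ [(np.1, v)]))) acc
      = acc.flatMap (fun d => (pvProdAll (params.map (·.2))).map
          (fun vals => d ++ (params.map (·.1)).zip vals)) := by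
  induction params generalizing acc with
  | nil => simp [pvProdAll]
  | cons hd tl ih =>
      simp only [List.foldl_cons, ih, pvProdAll, List.map_cons]
      simp [List.flatMap_assoc, List.map_flatMap, List.flatMap_map, Function.comp_def,
        List.map_map, List.zip, List.zipWith_cons_cons]

-- ===== VERDICT (by name: the statement is the Claim_ definition above) =====
theorem product_of_pools_py_spec : Claim_equal_product_of_pools_py := by
  intro params _ _
  unfold Spec_product_of_pools_py product_of_pools_py product_of_pools_py_alt
  simp only [pvFoldl_extend, pvFoldl_append_snd, List.nil_append]
  rcases params with _ | ⟨hd, tl⟩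
  · simp [pvProdAll]
  · simp
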